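-- pv_equiv track=rewrite | github.com/jonahtballard/CatBase | backend/scripts/ingest_uvm_current.py | smart_instructor_split
-- ===== SOURCE A (Python) =====
-- def smart_instructor_split(instructor_field: str) -> list[str]:
--     """
--     UVM 'Instructor' sometimes contains multiple names in one cell.
--     We avoid splitting on commas (since names are 'Last, First').
--     Split on obvious separators: ';', '/', ' & ', ' and '.
--     """
--     s = (instructor_field or "").strip()
--     if not s:
--         return []
--     # Normalize some common delimiters
--     for delim in [" / ", " & ", " and "]:
--         s = s.replace(delim, ";")
--     parts = [p.strip() for p in s.split(";") if p.strip()]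
--     return parts or [instructor_field.strip()]
-- ===== SOURCE B (Python) =====
-- def smart_instructor_split(instructor_field: str) -> list[str]:
--     s = (instructor_field or "").strip()
--     if not s:
--         return []
--     out: list[str] = []
--
--     def emit(piece: str, delims) -> None:
--         if delims:
--             for sub in piece.split(delims[0]):
--                 emit(sub, delims[1:])
--         else:
--             p = piece.strip()
--             if p:
--                 out.append(p)
--
--     emit(s, (" / ", " & ", " and ", ";"))
--     return out or [instructor_field.strip()]
-- ===== Notes on version B (the rewrite author's own statement) =====
-- stated objective: alternative
-- what changed: B drops A's three delimiter-normalizing replace passes and the separate strip/filter comprehension: it recursively descends over the delimiter list (' / ', ' & ', ' and ', ';'), splitting each fragment on the current delimiter and emitting stripped non-empty tokens directly at the leaves of the recursion; a single left-to-right regex alternation would NOT be equivalent on overlapping separators, so B keeps A's pass order as recursion order.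
import Mathlib
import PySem

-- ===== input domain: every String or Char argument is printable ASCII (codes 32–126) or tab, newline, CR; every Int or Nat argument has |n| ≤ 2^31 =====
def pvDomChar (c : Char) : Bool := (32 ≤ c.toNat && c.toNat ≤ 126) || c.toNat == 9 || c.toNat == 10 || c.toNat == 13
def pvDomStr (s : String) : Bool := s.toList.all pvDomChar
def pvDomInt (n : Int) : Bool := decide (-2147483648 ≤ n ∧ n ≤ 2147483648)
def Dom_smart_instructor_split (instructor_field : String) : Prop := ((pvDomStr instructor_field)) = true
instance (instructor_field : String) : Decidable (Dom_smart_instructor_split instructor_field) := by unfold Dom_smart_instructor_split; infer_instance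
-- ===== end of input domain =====

-- B replaces A's replace-normalize/split/filter pipeline by a recursive descent over the delimiter
-- list that emits stripped non-empty tokens directly at the leaves; objective: alternative decomposition, same cost.

-- ===== PORT A =====
-- A: normalize " / ", " & ", " and " to ";" by successive replace passes, then split once on ";",
-- then strip/filter the pieces, with a fallback to the stripped original field.
def smart_instructor_split (instructor_field : String) : List String :=
  let s0 := if instructor_field = "" then "" else instructor_field   -- (instructor_field or "")
  let s1 := PySem.Str.strip s0
  if s1 = "" then []
  else
    let s2 := [" / ", " & ", " and "].foldl (fun s d => PySem.Str.replace s d ";") s1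
    let pieces := (PySem.Chars.splitOn s2.toList (";".toList)).map String.ofList   -- s.split(";")
    let parts := pieces.filterMap (fun p =>
      let q := PySem.Str.strip p; if q = "" then none else some q)   -- [p.strip() for p in … if p.strip()]
    if parts = [] then [PySem.Str.strip instructor_field] else parts

-- ===== PORT B =====
-- B's recursive emitter: with delimiters left, split the piece on the first delimiter and recurse
-- into every fragment; with none left, emit the stripped piece if non-empty (Python's `emit`,
-- appending to `out` left to right = flatMap of the recursive results).
def emitTok : List String → List Char → List String
  | [], piece =>
      let p := PySem.Str.strip (String.ofList piece)
      if p = "" then [] else [p]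
  | d :: rest, piece => (PySem.Chars.splitOn piece d.toList).flatMap (emitTok rest)

def smart_instructor_split_alt (instructor_field : String) : List String :=
  let s := PySem.Str.strip (if instructor_field = "" then "" else instructor_field)
  if s = "" then []
  else
    let out := emitTok [" / ", " & ", " and ", ";"] s.toList
    if out = [] then [PySem.Str.strip instructor_field] else out

-- ===== PRECONDITION & SPEC =====
def Spec_smart_instructor_split (instructor_field : String) (out : List String) : Prop := out = smart_instructor_split_alt instructor_field
instance (instructor_field : String) (out : List String) : Decidable (Spec_smart_instructor_split instructor_field out) := by unfold Spec_smart_instructor_split; infer_instance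

-- ===== CLAIM (what is proved, stated in full; the proofs are below) =====
def Claim_equal_smart_instructor_split : Prop := ∀ (instructor_field : String), Dom_smart_instructor_split instructor_field → Spec_smart_instructor_split instructor_field (smart_instructor_split instructor_field)

-- ===== LEMMAS AND PROOFS =====
def mySplit (sep : List Char) : List Char → List (List Char)
  | [] => [[]]
  | c :: t =>
    if h : sep ≠ [] ∧ sep.isPrefixOf (c :: t) = true then
      [] :: mySplit sep ((c :: t).drop sep.length)
    else
      (mySplit sep t).modifyHead (c :: ·)
termination_by l => l.length
decreasing_by
  · have : 0 < sep.length := List.length_pos_iff.mpr h.1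
    simp; omega
  · simp

theorem mySplit_ne_nil (sep : List Char) (l : List Char) : mySplit sep l ≠ [] := by
  fun_induction mySplit sep l with
  | case1 => simp
  | case2 c t h ih => simp
  | case3 c t h ih => rcases hm : mySplit sep t with _ | ⟨a, b⟩ <;> simp_all

def myReplace (old new : List Char) : List Char → List Char
  | [] => []
  | c :: t =>
    if h : old ≠ [] ∧ old.isPrefixOf (c :: t) = true then
      new ++ myReplace old new ((c :: t).drop old.length)
    else
      c :: myReplace old new t
termination_by l => l.length
decreasing_by
  · have : 0 < old.length := List.length_pos_iff.mpr h.1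
    simp; omega
  · simp

theorem myReplace_cons (old new : List Char) (c : Char) (t : List Char) :
    myReplace old new (c :: t) =
      if h : old ≠ [] ∧ old.isPrefixOf (c :: t) = true then new ++ myReplace old new ((c :: t).drop old.length)
      else c :: myReplace old new t := by
  rw [myReplace]

theorem mySplit_cons (sep : List Char) (c : Char) (t : List Char) :
    mySplit sep (c :: t) =
      if h : sep ≠ [] ∧ sep.isPrefixOf (c :: t) = true then [] :: mySplit sep ((c :: t).drop sep.length)
      else (mySplit sep t).modifyHead (c :: ·) := by
  rw [mySplit]

theorem replace_go_eq (old new : List Char) (hold : old ≠ []) :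
    ∀ (fuel : Nat) (l acc : List Char), l.length ≤ fuel →
      PySem.Chars.replace.go old new fuel l acc = acc.reverse ++ myReplace old new l := by
  intro fuel
  induction fuel with
  | zero =>
    intro l acc h
    have : l = [] := by cases l <;> simp_all
    subst this
    simp [PySem.Chars.replace.go, myReplace]
  | succ n ih =>
    intro l acc h
    cases l with
    | nil => simp [PySem.Chars.replace.go, myReplace]
    | cons c t =>
      rw [PySem.Chars.replace.go, myReplace]
      by_cases hp : old.isPrefixOf (c :: t) = true
      · rw [if_pos hp, dif_pos ⟨hold, hp⟩]
        have hlen : 0 < old.length := List.length_pos_iff.mpr hold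
        rw [ih _ _ (by simp at h ⊢; omega)]
        simp
      · rw [if_neg hp, dif_neg (by simp [hp]), ih _ _ (by simp at h ⊢; omega)]
        simp

theorem replace_eq (s old new : List Char) (hold : old ≠ []) :
    PySem.Chars.replace s old new = myReplace old new s := by
  rw [PySem.Chars.replace]
  rw [if_neg (by simp [hold])]
  exact replace_go_eq old new hold _ s [] le_rfl

theorem modifyHead_modifyHead {α : Type} (f g : α → α) (l : List α) :
    (l.modifyHead g).modifyHead f = l.modifyHead (f ∘ g) := by
  cases l <;> simp

theorem splitOn_go_eq (sep : List Char) (hsep : sep ≠ []) :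
    ∀ (fuel : Nat) (l cur : List Char) (acc : List (List Char)), l.length ≤ fuel →
      PySem.Chars.splitOn.go sep fuel l cur acc =
        acc.reverse ++ (mySplit sep l).modifyHead (cur.reverse ++ ·) := by
  intro fuel
  induction fuel with
  | zero =>
    intro l cur acc h
    have : l = [] := by cases l <;> simp_all
    subst this
    simp [PySem.Chars.splitOn.go, mySplit]
  | succ n ih =>
    intro l cur acc h
    cases l with
    | nil => simp [PySem.Chars.splitOn.go, mySplit]
    | cons c t =>
      rw [PySem.Chars.splitOn.go, mySplit]
      by_cases hp : sep.isPrefixOf (c :: t) = true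
      · rw [if_pos hp, dif_pos ⟨hsep, hp⟩]
        have hlen : 0 < sep.length := List.length_pos_iff.mpr hsep
        rw [ih _ _ _ (by simp at h ⊢; omega)]
        simp
        rcases hm : mySplit sep (List.drop sep.length (c :: t)) with _ | ⟨a, b⟩ <;> simp
      · rw [if_neg hp, dif_neg (by simp [hp]), ih _ _ _ (by simp at h ⊢; omega)]
        rw [modifyHead_modifyHead]
        congr 2
        funext x
        simp

theorem splitOn_eq (s sep : List Char) (hsep : sep ≠ []) :
    PySem.Chars.splitOn s sep = mySplit sep s := by
  rw [PySem.Chars.splitOn, splitOn_go_eq sep hsep _ _ _ _ (by omega)]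
  rcases h : mySplit sep s with _ | ⟨a, b⟩ <;> simp

theorem isPrefixOf_semi (c : List Char) (hc : ';' ∉ c) :
    ∀ x y : List Char, c.isPrefixOf (x ++ ';' :: y) = c.isPrefixOf x := by
  induction c with
  | nil => intro x y; simp [List.isPrefixOf]
  | cons a c' ih =>
    intro x y
    cases x with
    | nil =>
      simp [List.isPrefixOf]
      intro h
      exact absurd (h ▸ List.mem_cons_self) hc
    | cons b x' =>
      simp only [List.cons_append, List.isPrefixOf]
      rw [ih (by simp at hc; tauto) x' y]

theorem myReplace_semi_append (old new : List Char) (hold : old ≠ []) (hc : ';' ∉ old) :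
    ∀ x y : List Char, myReplace old new (x ++ ';' :: y) = myReplace old new x ++ ';' :: myReplace old new y := by
  have hlen : 0 < old.length := List.length_pos_iff.mpr hold
  suffices H : ∀ n (x y : List Char), x.length ≤ n →
      myReplace old new (x ++ ';' :: y) = myReplace old new x ++ ';' :: myReplace old new y by
    intro x y; exact H x.length x y le_rfl
  intro n
  induction n with
  | zero =>
    intro x y h
    have : x = [] := by cases x <;> simp_all
    subst this
    simp only [List.nil_append]
    rw [myReplace_cons, dif_neg]
    · simp [myReplace]
    · rintro ⟨-, hp⟩
      cases old with
      | nil => exact hold rfl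
      | cons o t =>
        simp [List.isPrefixOf] at hp
        simp [hp.1] at hc
  | succ n ih =>
    intro x y h
    cases x with
    | nil => exact ih [] y (by simp)
    | cons ch t =>
      have hpre := isPrefixOf_semi old hc (ch :: t) y
      rw [List.cons_append, myReplace_cons, myReplace_cons]
      by_cases hp : old.isPrefixOf (ch :: t) = true
      · rw [dif_pos ⟨hold, by rw [← List.cons_append, hpre]; exact hp⟩, dif_pos ⟨hold, hp⟩]
        have hol : old.length ≤ (ch :: t).length := (List.isPrefixOf_iff_prefix.mp hp).length_le
        rw [← List.cons_append, List.drop_append_of_le_length hol]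
        rw [ih _ y (by simp at h ⊢; omega)]
        simp
      · rw [dif_neg (by rw [← List.cons_append, hpre]; simp [hp]), dif_neg (by simp [hp])]
        rw [ih t y (by simp at h; omega)]
        simp

theorem modifyHead_append_of_ne_nil {α : Type} (f : α → α) (l l' : List α) (h : l ≠ []) :
    (l ++ l').modifyHead f = l.modifyHead f ++ l' := by
  cases l <;> simp_all

theorem mySplit_semi_append :
    ∀ x y : List Char, mySplit [';'] (x ++ ';' :: y) = mySplit [';'] x ++ mySplit [';'] y := by
  intro x y
  induction x with
  | nil =>
    rw [List.nil_append, mySplit_cons, dif_pos (by simp [List.isPrefixOf])]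
    simp [mySplit]
  | cons c t ih =>
    rw [List.cons_append, mySplit_cons, mySplit_cons]
    by_cases hc : c = ';'
    · subst hc
      rw [dif_pos (by simp [List.isPrefixOf]), dif_pos (by simp [List.isPrefixOf])]
      simp [ih]
    · have hne : (([';'] : List Char) ≠ [] ∧ List.isPrefixOf [';'] (c :: t) = true) → False := by
        rintro ⟨-, hp⟩
        simp [List.isPrefixOf] at hp
        exact hc hp.symm
      have hne' : (([';'] : List Char) ≠ [] ∧ List.isPrefixOf [';'] (c :: (t ++ ';' :: y)) = true) → False := by
        rintro ⟨-, hp⟩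
        simp [List.isPrefixOf] at hp
        exact hc hp.symm
      rw [dif_neg hne', dif_neg hne, ih]
      exact modifyHead_append_of_ne_nil _ _ _ (mySplit_ne_nil _ _)

def joinSemi : List (List Char) → List Char
  | [] => []
  | [x] => x
  | x :: y :: l => x ++ ';' :: joinSemi (y :: l)

theorem myReplace_eq_joinSemi (d : List Char) (hd : d ≠ []) :
    ∀ u : List Char, myReplace d [';'] u = joinSemi (mySplit d u) := by
  have hlen : 0 < d.length := List.length_pos_iff.mpr hd
  suffices H : ∀ n (u : List Char), u.length ≤ n → myReplace d [';'] u = joinSemi (mySplit d u) by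
    intro u; exact H u.length u le_rfl
  intro n
  induction n with
  | zero =>
    intro u h
    have : u = [] := by cases u <;> simp_all
    subst this
    simp [myReplace, mySplit, joinSemi]
  | succ n ih =>
    intro u h
    cases u with
    | nil => simp [myReplace, mySplit, joinSemi]
    | cons c t =>
      rw [myReplace_cons, mySplit_cons]
      by_cases hp : d.isPrefixOf (c :: t) = true
      · rw [dif_pos ⟨hd, hp⟩, dif_pos ⟨hd, hp⟩]
        have hol : d.length ≤ (c :: t).length := (List.isPrefixOf_iff_prefix.mp hp).length_le
        rw [ih _ (by simp at h ⊢; omega)]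
        rcases hm : mySplit d (List.drop d.length (c :: t)) with _ | ⟨a, b⟩
        · exact absurd hm (mySplit_ne_nil _ _)
        · simp [joinSemi]
      · rw [dif_neg (by simp [hp]), dif_neg (by simp [hp]), ih t (by simp at h; omega)]
        rcases hm : mySplit d t with _ | ⟨a, b⟩
        · exact absurd hm (mySplit_ne_nil _ _)
        · cases b <;> simp [joinSemi]

theorem hom_joinSemi {β : Type} (H : List Char → List β)
    (hom : ∀ x y, H (x ++ ';' :: y) = H x ++ H y) :
    ∀ L : List (List Char), L ≠ [] → H (joinSemi L) = L.flatMap H := by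
  intro L
  induction L with
  | nil => simp
  | cons x l ih =>
    intro _
    cases l with
    | nil => simp [joinSemi]
    | cons y l' => rw [joinSemi, hom, ih (by simp)]; simp

theorem hom_flat {β : Type} (H : List Char → List β)
    (hom : ∀ x y, H (x ++ ';' :: y) = H x ++ H y)
    (d : List Char) (hd : d ≠ []) (u : List Char) :
    H (myReplace d [';'] u) = (mySplit d u).flatMap H := by
  rw [myReplace_eq_joinSemi d hd]
  exact hom_joinSemi H hom _ (mySplit_ne_nil d u)

theorem core (L : List Char) :
    mySplit [';'] (myReplace " and ".toList [';'] (myReplace " & ".toList [';'] (myReplace " / ".toList [';'] L)))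
      = ((((mySplit " / ".toList L).flatMap (mySplit " & ".toList)).flatMap (mySplit " and ".toList)).flatMap (mySplit [';'])) := by
  have ha : (" / ".toList : List Char) ≠ [] := by decide
  have hb : (" & ".toList : List Char) ≠ [] := by decide
  have hcn : (" and ".toList : List Char) ≠ [] := by decide
  have hb' : ';' ∉ " & ".toList := by decide
  have hc' : ';' ∉ " and ".toList := by decide
  have hom2 : ∀ x y : List Char,
      mySplit [';'] (myReplace " and ".toList [';'] (x ++ ';' :: y))
        = mySplit [';'] (myReplace " and ".toList [';'] x) ++ mySplit [';'] (myReplace " and ".toList [';'] y) := by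
    intro x y
    rw [myReplace_semi_append _ _ hcn hc', mySplit_semi_append]
  have hom1 : ∀ x y : List Char,
      mySplit [';'] (myReplace " and ".toList [';'] (myReplace " & ".toList [';'] (x ++ ';' :: y)))
        = mySplit [';'] (myReplace " and ".toList [';'] (myReplace " & ".toList [';'] x))
          ++ mySplit [';'] (myReplace " and ".toList [';'] (myReplace " & ".toList [';'] y)) := by
    intro x y
    rw [myReplace_semi_append _ _ hb hb', hom2]
  have e1 := hom_flat (fun u => mySplit [';'] (myReplace " and ".toList [';'] (myReplace " & ".toList [';'] u))) hom1 _ ha L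
  have e2 := fun t => hom_flat (fun u => mySplit [';'] (myReplace " and ".toList [';'] u)) hom2 _ hb t
  have e3 := fun t => hom_flat (mySplit [';']) mySplit_semi_append _ hcn t
  rw [e1]
  simp only [e2, e3, List.flatMap_assoc]

-- B-side bridge: the emitter equals "nested splits, then base-emit per fragment".
def nestedSplit : List String → List Char → List (List Char)
  | [], L => [L]
  | d :: rest, L => (mySplit d.toList L).flatMap (nestedSplit rest)

def baseEmit (L : List Char) : List String :=
  let p := PySem.Str.strip (String.ofList L)
  if p = "" then [] else [p]

theorem emitTok_eq (delims : List String) (hne : ∀ d ∈ delims, d.toList ≠ []) :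
    ∀ L : List Char, emitTok delims L = (nestedSplit delims L).flatMap baseEmit := by
  induction delims with
  | nil => intro L; simp [emitTok, nestedSplit, baseEmit]
  | cons d rest ih =>
    intro L
    rw [emitTok, nestedSplit, splitOn_eq _ _ (hne d (by simp)), List.flatMap_assoc]
    congr 1
    funext x
    exact ih (fun e he => hne e (by simp [he])) x

theorem filterMap_eq_flatMap_baseEmit (pieces : List (List Char)) :
    (pieces.map String.ofList).filterMap (fun p =>
        let q := PySem.Str.strip p; if q = "" then none else some q)
      = pieces.flatMap baseEmit := by
  induction pieces with
  | nil => simp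
  | cons x l ih =>
    simp only [List.map_cons, List.filterMap_cons, List.flatMap_cons, baseEmit]
    by_cases h : PySem.Str.strip (String.ofList x) = "" <;> simp [h, ih]

-- ===== VERDICT (by name: the statement is the Claim_ definition above) =====
theorem smart_instructor_split_spec : Claim_equal_smart_instructor_split := by
  intro f _
  unfold Spec_smart_instructor_split smart_instructor_split smart_instructor_split_alt
  dsimp only []
  rw [List.foldl_cons, List.foldl_cons, List.foldl_cons, List.foldl_nil]
  by_cases h : PySem.Str.strip (if f = "" then "" else f) = ""
  · rw [if_pos h, if_pos h]
  · rw [if_neg h, if_neg h]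
    rw [PySem.Str.toList_replace, PySem.Str.toList_replace, PySem.Str.toList_replace]
    rw [replace_eq _ _ _ (by decide), replace_eq _ _ _ (by decide), replace_eq _ _ _ (by decide)]
    rw [splitOn_eq _ _ (by decide)]
    rw [show ((";".toList : List Char)) = [';'] from rfl, core]
    rw [filterMap_eq_flatMap_baseEmit]
    rw [emitTok_eq _ (by decide)]
    simp only [nestedSplit, List.flatMap_assoc]
    simp
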